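-- pv_equiv track=rewrite | github.com/skywalkerw/jdtls-lsp-py | src/jdtls_lsp/callchain/format.py | _collect_downstream_sinks_by_kind
-- ===== SOURCE A (Python) =====
-- from typing import Any
--
-- def _classify_downstream_sink(node: dict[str, Any]) -> str:
--     """
--     启发式分类向下链中的「终点」侧节点：数据库 / 中间件 / 第三方 HTTP 客户端 / 其他。
--     仅基于类名、路径、方法名，不解析 AST。
--     """
--     cls = str(node.get("class", ""))
--     file = str(node.get("file", "")).lower().replace("\\", "/")
--     meth = str(node.get("method", "")).lower()
--     blob = f"{cls.lower()} {file} {meth}"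
--
--     if "repository" in cls or "/repository/" in file:
--         return "database"
--     if "mapper" in cls and ("mapper" in file or "mybatis" in file):
--         return "database"
--     if any(x in blob for x in ("jdbctemplate", "entitymanager", "namedparameterjdbc", "preparedstatement")):
--         return "database"
--     if any(x in blob for x in (".jpa.", "hibernate", "jpql", "criteriaquery")):
--         return "database"
--     if cls.endswith("Dao") or "Dao" in cls:
--         return "database"
--
--     if any(x in blob for x in ("kafka", "rabbit", "amqp", "redis", "mongotemplate", "springframework.data.mongodb")):
--         return "middleware"
--     if any(x in cls for x in ("Kafka", "Rabbit", "Redis", "Amqp", "MongoTemplate")):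
--         return "middleware"
--
--     if any(
--         x in blob
--         for x in (
--             "resttemplate",
--             "webclient",
--             "feign",
--             "openfeign",
--             "httpclient",
--             "okhttp",
--             "retrofit",
--             "webmvc.client",
--         )
--     ):
--         return "external_api"
--     if "/feign/" in file or "feign" in file:
--         return "external_api"
--
--     return "other"
--
-- def _collect_downstream_sinks_by_kind(
--     nodes: dict[str, Any],
--     edges: list[Any],
-- ) -> tuple[dict[str, list[str]], set[str]]:
--     """
--     返回 {kind: [node_key,...]}，且计算「叶」节点键（在子图中无出边）。
--     """
--     outgoing_from: set[str] = set()
--     for e in edges: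
--         if isinstance(e, dict) and isinstance(e.get("from"), str):
--             outgoing_from.add(e["from"])
--     leaf_keys = {k for k in nodes if k not in outgoing_from}
--
--     buckets: dict[str, list[str]] = {"database": [], "middleware": [], "external_api": [], "other": []}
--     # 优先：叶节点且分类非 other
--     for nk, n in nodes.items():
--         if not isinstance(n, dict):
--             continue
--         kind = _classify_downstream_sink(n)
--         buckets[kind].append(nk)
--
--     for k in buckets:
--         buckets[k].sort()
--
--     return buckets, leaf_keys
-- ===== SOURCE B (Python) =====
-- _DB_BLOB = ("jdbctemplate", "entitymanager", "namedparameterjdbc", "preparedstatement",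
--             ".jpa.", "hibernate", "jpql", "criteriaquery")
-- _MW_BLOB = ("kafka", "rabbit", "amqp", "redis", "mongotemplate", "springframework.data.mongodb")
-- _MW_CLS = ("Kafka", "Rabbit", "Redis", "Amqp", "MongoTemplate")
-- _EXT_BLOB = ("resttemplate", "webclient", "feign", "openfeign", "httpclient",
--              "okhttp", "retrofit", "webmvc.client")
--
--
-- def _classify_downstream_sink(node):
--     cls = str(node.get("class", ""))
--     file = str(node.get("file", "")).lower().replace("\\", "/")
--     meth = str(node.get("method", "")).lower()
--     blob = f"{cls.lower()} {file} {meth}"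
--     # rule table, scanned for the first hit (endswith('Dao') and '/feign/' are
--     # implied by the neighbouring substring tests and therefore fused away)
--     rules = (
--         ("database", lambda: "repository" in cls or "/repository/" in file
--                      or ("mapper" in cls and ("mapper" in file or "mybatis" in file))
--                      or any(w in blob for w in _DB_BLOB) or "Dao" in cls),
--         ("middleware", lambda: any(w in blob for w in _MW_BLOB)
--                      or any(w in cls for w in _MW_CLS)),
--         ("external_api", lambda: any(w in blob for w in _EXT_BLOB) or "feign" in file),
--     )
--     return next((kind for kind, hit in rules if hit()), "other")
--
--
-- def _collect_downstream_sinks_by_kind(nodes, edges):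
--     sources = {e["from"] for e in edges
--                if isinstance(e, dict) and isinstance(e.get("from"), str)}
--     leaf_keys = {k for k in nodes if k not in sources}
--     tagged = [(nk, _classify_downstream_sink(n))
--               for nk, n in sorted(nodes.items(), key=lambda kv: kv[0])
--               if isinstance(n, dict)]
--     buckets = {kind: [nk for nk, kd in tagged if kd == kind]
--                for kind in ("database", "middleware", "external_api", "other")}
--     return buckets, leaf_keys
-- ===== Notes on version B (the rewrite author's own statement) =====
-- stated objective: alternative
-- what changed: B replaces A's mutable-bucket append loop plus four per-bucket sorts by one global key-sort followed by a distributing comprehension per kind (each bucket comes out sorted), rewrites the classifier's cascade of early returns as a first-hit scan over a rule table (fusing tests implied by their neighbours), and builds the edge-source set and leaf set by comprehensions instead of explicit accumulation loops.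
import Mathlib
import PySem

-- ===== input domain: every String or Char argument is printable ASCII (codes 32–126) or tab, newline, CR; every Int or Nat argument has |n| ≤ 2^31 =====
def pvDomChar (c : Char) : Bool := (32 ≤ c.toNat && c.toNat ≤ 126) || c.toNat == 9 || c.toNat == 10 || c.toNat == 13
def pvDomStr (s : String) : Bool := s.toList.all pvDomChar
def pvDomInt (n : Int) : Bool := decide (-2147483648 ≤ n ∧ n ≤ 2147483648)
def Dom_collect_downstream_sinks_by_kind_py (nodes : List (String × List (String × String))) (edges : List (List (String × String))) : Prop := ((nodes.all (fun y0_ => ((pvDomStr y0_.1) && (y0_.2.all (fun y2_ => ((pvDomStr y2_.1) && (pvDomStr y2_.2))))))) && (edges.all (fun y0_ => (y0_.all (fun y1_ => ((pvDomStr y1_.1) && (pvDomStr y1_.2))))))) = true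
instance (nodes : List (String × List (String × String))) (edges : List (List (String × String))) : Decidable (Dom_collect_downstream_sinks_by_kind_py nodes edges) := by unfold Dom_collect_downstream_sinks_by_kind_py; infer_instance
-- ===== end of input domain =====

-- B restructures A's "append-into-mutable-buckets then sort each bucket" into one global key-sort
-- followed by a distributing filter per kind, builds the source and leaf sets by comprehensions
-- (filterMap/filter + set-of-list) instead of accumulation loops, and replaces the classifier's
-- cascade of early returns by a first-hit scan over a rule table; objective: alternative decomposition.


-- ===== PORT A =====

-- str(node.get(f, "")) for a string-valued node dict
def pvField (n : List (String × String)) (f : String) : String :=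
  (PySem.Dict.mk n).getD f ""

-- _classify_downstream_sink, literal cascade of ifs
def pvClassifyA (n : List (String × String)) : String :=
  let cls := pvField n "class"
  let file := PySem.Str.replace (PySem.Str.lower (pvField n "file")) "\\" "/"
  let meth := PySem.Str.lower (pvField n "method")
  let blob := PySem.Str.lower cls ++ " " ++ file ++ " " ++ meth
  if PySem.Str.isIn "repository" cls || PySem.Str.isIn "/repository/" file then "database"
  else if PySem.Str.isIn "mapper" cls && (PySem.Str.isIn "mapper" file || PySem.Str.isIn "mybatis" file) then "database"
  else if ["jdbctemplate", "entitymanager", "namedparameterjdbc", "preparedstatement"].any (fun x => PySem.Str.isIn x blob) then "database"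
  else if [".jpa.", "hibernate", "jpql", "criteriaquery"].any (fun x => PySem.Str.isIn x blob) then "database"
  else if PySem.Str.endswith cls "Dao" || PySem.Str.isIn "Dao" cls then "database"
  else if ["kafka", "rabbit", "amqp", "redis", "mongotemplate", "springframework.data.mongodb"].any (fun x => PySem.Str.isIn x blob) then "middleware"
  else if ["Kafka", "Rabbit", "Redis", "Amqp", "MongoTemplate"].any (fun x => PySem.Str.isIn x cls) then "middleware"
  else if ["resttemplate", "webclient", "feign", "openfeign", "httpclient", "okhttp", "retrofit", "webmvc.client"].any (fun x => PySem.Str.isIn x blob) then "external_api"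
  else if PySem.Str.isIn "/feign/" file || PySem.Str.isIn "feign" file then "external_api"
  else "other"

def collect_downstream_sinks_by_kind_py (nodes : List (String × List (String × String))) (edges : List (List (String × String))) : (List (String × List String)) × List String :=
  let outgoing : PySem.Set String := edges.foldl (fun s e =>
    match (PySem.Dict.mk e).get? "from" with
    | some v => PySem.Set.add s v
    | none => s) PySem.Set.empty
  let leaf : PySem.Set String := nodes.foldl (fun s p =>
    if PySem.Set.contains outgoing p.1 then s else PySem.Set.add s p.1) PySem.Set.empty
  let b0 : PySem.Dict String (List String) :=
    PySem.Dict.mk [("database", []), ("middleware", []), ("external_api", []), ("other", [])]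
  let buckets := nodes.foldl (fun b p => b.modify (pvClassifyA p.2) [] (fun l => l ++ [p.1])) b0
  let buckets2 := PySem.Dict.mk (buckets.items.map (fun q => (q.1, PySem.List.sorted q.2 (fun x => x) false)))
  (buckets2.items, leaf)

-- ===== PORT B =====

-- Source B's classifier: first-hit scan over a rule table (kind, hit)
def pvClassifyB (n : List (String × String)) : String :=
  let cls := (PySem.Dict.mk n).getD "class" ""
  let file := PySem.Str.replace (PySem.Str.lower ((PySem.Dict.mk n).getD "file" "")) "\\" "/"
  let meth := PySem.Str.lower ((PySem.Dict.mk n).getD "method" "")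
  let blob := PySem.Str.lower cls ++ " " ++ file ++ " " ++ meth
  let rules : List (String × (Unit → Bool)) :=
    [("database", fun _ =>
        PySem.Str.isIn "repository" cls || PySem.Str.isIn "/repository/" file
        || (PySem.Str.isIn "mapper" cls && (PySem.Str.isIn "mapper" file || PySem.Str.isIn "mybatis" file))
        || ["jdbctemplate", "entitymanager", "namedparameterjdbc", "preparedstatement", ".jpa.", "hibernate", "jpql", "criteriaquery"].any (fun w => PySem.Str.isIn w blob)
        || PySem.Str.isIn "Dao" cls),
     ("middleware", fun _ =>
        ["kafka", "rabbit", "amqp", "redis", "mongotemplate", "springframework.data.mongodb"].any (fun w => PySem.Str.isIn w blob)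
        || ["Kafka", "Rabbit", "Redis", "Amqp", "MongoTemplate"].any (fun w => PySem.Str.isIn w cls)),
     ("external_api", fun _ =>
        ["resttemplate", "webclient", "feign", "openfeign", "httpclient", "okhttp", "retrofit", "webmvc.client"].any (fun w => PySem.Str.isIn w blob)
        || PySem.Str.isIn "feign" file)]
  (((rules.find? (fun r => r.2 ())).map (fun r => r.1)).getD "other")

def collect_downstream_sinks_by_kind_py_alt (nodes : List (String × List (String × String))) (edges : List (List (String × String))) : (List (String × List String)) × List String :=
  let sources : PySem.Set String :=
    PySem.Set.ofList (edges.filterMap (fun e => (PySem.Dict.mk e).get? "from"))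
  let leaf : PySem.Set String :=
    PySem.Set.ofList ((nodes.map Prod.fst).filter (fun k => !(PySem.Set.contains sources k)))
  let tagged := (PySem.List.sorted nodes (fun p => p.1) false).map (fun p => (p.1, pvClassifyB p.2))
  (["database", "middleware", "external_api", "other"].map (fun kind =>
      (kind, (tagged.filter (fun q => q.2 == kind)).map (fun q => q.1))),
   leaf)

-- ===== PRECONDITION & SPEC =====
def Spec_collect_downstream_sinks_by_kind_py (nodes : List (String × List (String × String))) (edges : List (List (String × String))) (out : (List (String × List String)) × List String) : Prop := out = collect_downstream_sinks_by_kind_py_alt nodes edges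
instance (nodes : List (String × List (String × String))) (edges : List (List (String × String))) (out : (List (String × List String)) × List String) : Decidable (Spec_collect_downstream_sinks_by_kind_py nodes edges out) := by unfold Spec_collect_downstream_sinks_by_kind_py; infer_instance

-- ===== CLAIM (what is proved, stated in full; the proofs are below) =====
def Claim_equal_collect_downstream_sinks_by_kind_py : Prop := ∀ (nodes : List (String × List (String × String))) (edges : List (List (String × String))), Dom_collect_downstream_sinks_by_kind_py nodes edges → Spec_collect_downstream_sinks_by_kind_py nodes edges (collect_downstream_sinks_by_kind_py nodes edges)

-- ===== LEMMAS AND PROOFS =====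

theorem pvEndsDao_isIn (s : String) (h : PySem.Str.endswith s "Dao" = true) :
    PySem.Str.isIn "Dao" s = true := by
  rw [PySem.Str.isIn_iff_infix]
  simp only [PySem.Str.endswith_eq] at h
  exact ((PySem.Chars.endswith_iff _ _).mp h).isInfix

theorem pvFeign_isIn (s : String) (h : PySem.Str.isIn "/feign/" s = true) :
    PySem.Str.isIn "feign" s = true := by
  rw [PySem.Str.isIn_iff_infix] at *
  exact List.IsInfix.trans (by decide) h

theorem pvDaoOr (s : String) :
    (PySem.Str.endswith s "Dao" || PySem.Str.isIn "Dao" s) = PySem.Str.isIn "Dao" s := by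
  cases h : PySem.Str.endswith s "Dao"
  · rw [Bool.false_or]
  · rw [Bool.true_or]; exact (pvEndsDao_isIn s h).symm

theorem pvFeignOr (s : String) :
    (PySem.Str.isIn "/feign/" s || PySem.Str.isIn "feign" s) = PySem.Str.isIn "feign" s := by
  cases h : PySem.Str.isIn "/feign/" s
  · rw [Bool.false_or]
  · rw [Bool.true_or]; exact (pvFeign_isIn s h).symm

theorem pvFind3 (k1 k2 k3 d : String) (f1 f2 f3 : Unit → Bool) :
    (((([(k1, f1), (k2, f2), (k3, f3)] : List (String × (Unit → Bool))).find? (fun r => r.2 ())).map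
        (fun r => r.1)).getD d)
    = if f1 () then k1 else if f2 () then k2 else if f3 () then k3 else d := by
  cases h1 : f1 () <;> cases h2 : f2 () <;> cases h3 : f3 () <;>
    simp [List.find?, h1, h2, h3]

theorem pvIf2 (a b : Bool) (K R : String) :
    (if a then K else if b then K else R) = if a || b then K else R := by
  cases a <;> cases b <;> rfl

theorem pvClassify_eq (n : List (String × String)) : pvClassifyA n = pvClassifyB n := by
  unfold pvClassifyA pvClassifyB pvField
  simp only [pvFind3, pvDaoOr, pvFeignOr, pvIf2, List.any_cons, List.any_nil,
    Bool.or_false, Bool.or_assoc]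

theorem pvClassifyA_mem (n : List (String × String)) :
    pvClassifyA n = "database" ∨ pvClassifyA n = "middleware" ∨
    pvClassifyA n = "external_api" ∨ pvClassifyA n = "other" := by
  unfold pvClassifyA
  simp only [List.any_cons, List.any_nil, Bool.or_false]
  split_ifs <;> simp

-- A's source-set accumulation loop = set-of-list of the filterMap comprehension
theorem pvSources_eq (edges : List (List (String × String))) (s : PySem.Set String) :
    edges.foldl (fun s e =>
      match (PySem.Dict.mk e).get? "from" with
      | some v => PySem.Set.add s v
      | none => s) s
    = (edges.filterMap (fun e => (PySem.Dict.mk e).get? "from")).foldl PySem.Set.add s := by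
  induction edges generalizing s with
  | nil => rfl
  | cons e t ih =>
    rw [List.foldl_cons, List.filterMap_cons]
    cases h : (PySem.Dict.mk e).get? "from" <;> simp [h] <;> exact ih _

-- A's leaf accumulation loop = set-of-list of the filtered key comprehension
theorem pvLeaf_eq (ns : List (String × List (String × String))) (c : String → Bool)
    (s : PySem.Set String) :
    ns.foldl (fun s p => if c p.1 then s else PySem.Set.add s p.1) s
    = ((ns.map Prod.fst).filter (fun k => !(c k))).foldl PySem.Set.add s := by
  induction ns generalizing s with
  | nil => rfl
  | cons p t ih =>
    rw [List.foldl_cons, List.map_cons, List.filter_cons]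
    cases h : c p.1 <;> simp [h] <;> exact ih _

theorem pvSources_ofList (edges : List (List (String × String))) :
    edges.foldl (fun s e =>
      match (PySem.Dict.mk e).get? "from" with
      | some v => PySem.Set.add s v
      | none => s) PySem.Set.empty
    = PySem.Set.ofList (edges.filterMap (fun e => (PySem.Dict.mk e).get? "from")) := by
  rw [pvSources_eq, PySem.Set.ofList_eq_foldl]
  rfl

theorem pvLeaf_ofList (ns : List (String × List (String × String))) (c : String → Bool) :
    ns.foldl (fun s p => if c p.1 then s else PySem.Set.add s p.1) PySem.Set.empty
    = PySem.Set.ofList ((ns.map Prod.fst).filter (fun k => !(c k))) := by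
  rw [pvLeaf_eq, PySem.Set.ofList_eq_foldl]
  rfl

-- keys of ns whose node classifies as k (A's view)
def pvKeysOf (ns : List (String × List (String × String))) (k : String) : List String :=
  (ns.filter (fun p => pvClassifyA p.2 == k)).map (fun p => p.1)

theorem pvModLit (a b c d v : List String) (k : String)
    (hk : k = "database" ∨ k = "middleware" ∨ k = "external_api" ∨ k = "other") :
    (PySem.Dict.mk [("database", a), ("middleware", b), ("external_api", c), ("other", d)]).modify k [] (fun l => l ++ v) =
    PySem.Dict.mk [("database", if k = "database" then a ++ v else a),
                   ("middleware", if k = "middleware" then b ++ v else b),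
                   ("external_api", if k = "external_api" then c ++ v else c),
                   ("other", if k = "other" then d ++ v else d)] := by
  rcases hk with h | h | h | h <;> subst h <;>
    simp [PySem.Dict.modify, PySem.Dict.contains, PySem.Dict.getD, PySem.Dict.get?, PySem.Dict.insert]

theorem pvFoldA (ns : List (String × List (String × String))) (a b c d : List String) :
    ns.foldl (fun b p => b.modify (pvClassifyA p.2) [] (fun l => l ++ [p.1]))
      (PySem.Dict.mk [("database", a), ("middleware", b), ("external_api", c), ("other", d)]) =
    PySem.Dict.mk [("database", a ++ pvKeysOf ns "database"),
                   ("middleware", b ++ pvKeysOf ns "middleware"),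
                   ("external_api", c ++ pvKeysOf ns "external_api"),
                   ("other", d ++ pvKeysOf ns "other")] := by
  induction ns generalizing a b c d with
  | nil => simp [pvKeysOf]
  | cons p t ih =>
    rw [List.foldl_cons, pvModLit a b c d [p.1] _ (pvClassifyA_mem p.2), ih]
    rcases pvClassifyA_mem p.2 with h | h | h | h <;> simp [pvKeysOf, h]

theorem pvSortBucket (ns : List (String × List (String × String))) (k : String) :
    PySem.List.sorted (pvKeysOf ns k) (fun x => x) false =
    (((PySem.List.sorted ns (fun p => p.1) false).map (fun p => (p.1, pvClassifyB p.2))).filter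
        (fun q => q.2 == k)).map (fun q => q.1) := by
  have hS := PySem.List.sorted_perm ns (fun p => p.1) false
  set S := PySem.List.sorted ns (fun p => p.1) false with hSdef
  have hrhs : ((S.map (fun p => (p.1, pvClassifyB p.2))).filter (fun q => q.2 == k)).map (fun q => q.1)
      = (S.filter (fun p => pvClassifyA p.2 == k)).map (fun p => p.1) := by
    rw [List.filter_map, List.map_map]
    simp [Function.comp_def, pvClassify_eq]
  rw [hrhs]
  have hperm : (PySem.List.sorted (pvKeysOf ns k) (fun x => x) false).Perm
      ((S.filter (fun p => pvClassifyA p.2 == k)).map (fun p => p.1)) :=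
    (PySem.List.sorted_perm _ _ _).trans ((hS.symm.filter _).map _)
  have hs1 : (PySem.List.sorted (pvKeysOf ns k) (fun x => x) false).Pairwise (· ≤ ·) := by
    simpa using PySem.List.sorted_pairwise (pvKeysOf ns k) (fun x => x)
  have hp : S.Pairwise (fun a b => a.1 ≤ b.1) := PySem.List.sorted_pairwise ns (fun p => p.1)
  have hs2 : ((S.filter (fun p => pvClassifyA p.2 == k)).map (fun p => p.1)).Pairwise (· ≤ ·) :=
    List.pairwise_map.mpr (hp.sublist List.filter_sublist)
  exact hperm.eq_of_pairwise (fun a b _ _ h1 h2 => le_antisymm h1 h2) hs1 hs2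

-- ===== VERDICT (by name: the statement is the Claim_ definition above) =====
theorem collect_downstream_sinks_by_kind_py_spec : Claim_equal_collect_downstream_sinks_by_kind_py := by
  intro nodes edges _
  unfold Spec_collect_downstream_sinks_by_kind_py
  unfold collect_downstream_sinks_by_kind_py collect_downstream_sinks_by_kind_py_alt
  simp only [pvSources_ofList, pvLeaf_ofList]
  simp only [pvFoldA, List.nil_append]
  simp [pvSortBucket]
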